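-- pv_equiv track=rewrite | github.com/yuanconghao/easygpt-webui | server/models/corpus.py | check_format_openai
-- ===== SOURCE A (Python) =====
-- from collections import defaultdict
--
-- def check_format_openai(messages_line):
--     format_errors = defaultdict(int)
--     if "messages" not in messages_line:
--         format_errors["missing_messages_list"] += 1
--
--     messages = messages_line["messages"]
--     for message in messages:
--         if "role" not in message or "content" not in message:
--             format_errors["message_missing_key"] += 1
--
--         if any(k not in ("role", "content", "name") for k in message):
--             format_errors["message_unrecognized_key"] += 1
--
--         if message.get("role", None) not in ("system", "user", "assistant"):
--             format_errors["unrecognized_role"] += 1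
--
--         content = message.get("content", None)
--         if not content or not isinstance(content, str):
--             format_errors["missing_content"] += 1
--
--     if not any(message.get("role", None) == "assistant" for message in messages):
--         format_errors["example_missing_assistant_message"] += 1
--
--     if format_errors:
--         return False
--     return True
-- ===== SOURCE B (Python) =====
-- def check_format_openai(messages_line):
--     messages = messages_line["messages"]  # same KeyError as A when absent
--     has_assistant = False
--     for message in messages:
--         if "role" not in message or "content" not in message:
--             return False
--         for k in message:
--             if k not in ("role", "content", "name"):
--                 return False
--         if message.get("role") not in ("system", "user", "assistant"):
--             return False
--         content = message.get("content")
--         if not content or not isinstance(content, str):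
--             return False
--         if message["role"] == "assistant":
--             has_assistant = True
--     return has_assistant
-- ===== Notes on version B (the rewrite author's own statement) =====
-- stated objective: simpler
-- what changed: Replaces the defaultdict error accumulator and the separate any()-for-assistant pass with a single short-circuiting loop that returns False on the first violation and tracks an assistant flag, returning the flag at the end.
import Mathlib
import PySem

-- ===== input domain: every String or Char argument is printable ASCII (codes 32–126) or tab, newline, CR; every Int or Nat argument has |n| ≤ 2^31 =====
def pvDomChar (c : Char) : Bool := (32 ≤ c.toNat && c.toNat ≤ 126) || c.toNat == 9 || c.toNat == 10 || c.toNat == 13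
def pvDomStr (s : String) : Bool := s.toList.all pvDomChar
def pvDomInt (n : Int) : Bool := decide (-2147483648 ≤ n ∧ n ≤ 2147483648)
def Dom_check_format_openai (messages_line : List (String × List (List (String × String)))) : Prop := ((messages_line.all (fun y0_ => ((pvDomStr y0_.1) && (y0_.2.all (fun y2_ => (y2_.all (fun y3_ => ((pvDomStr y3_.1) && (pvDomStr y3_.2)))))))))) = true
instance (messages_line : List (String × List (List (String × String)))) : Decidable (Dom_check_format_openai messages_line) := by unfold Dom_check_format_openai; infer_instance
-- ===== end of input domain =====

-- B replaces A's defaultdict error accumulator + separate assistant-pass with one short-circuiting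
-- loop (return False on first violation, assistant flag tracked inline); same cost, simpler.


-- ===== PORT A =====
-- one iteration of A's loop body: conditionally bumps the four error counters
def pvAStep (fe : PySem.Dict String Int) (message : List (String × String)) : PySem.Dict String Int :=
  let m := PySem.Dict.ofList message
  let fe1 := if !(m.contains "role") || !(m.contains "content") then fe.modify "message_missing_key" 0 (· + 1) else fe
  let fe2 := if m.keys.any (fun k => !(k == "role" || k == "content" || k == "name")) then fe1.modify "message_unrecognized_key" 0 (· + 1) else fe1
  let fe3 := if !(m.get? "role" == some "system" || m.get? "role" == some "user" || m.get? "role" == some "assistant") then fe2.modify "unrecognized_role" 0 (· + 1) else fe2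
  let content := m.get? "content"
  if content == none || content == some "" then fe3.modify "missing_content" 0 (· + 1) else fe3

def check_format_openai (messages_line : List (String × List (List (String × String)))) : Bool :=
  let dl := PySem.Dict.ofList messages_line
  let fe0 : PySem.Dict String Int := PySem.Dict.empty
  let fe1 := if !(dl.contains "messages") then fe0.modify "missing_messages_list" 0 (· + 1) else fe0
  match dl.get? "messages" with
  | none => false   -- Python raises KeyError here; excluded by Pre_
  | some messages =>
    let fe2 := messages.foldl pvAStep fe1
    let fe3 := if !(messages.any (fun message => (PySem.Dict.ofList message).get? "role" == some "assistant")) then fe2.modify "example_missing_assistant_message" 0 (· + 1) else fe2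
    if fe3.size != 0 then false else true

-- ===== PORT B =====
-- B's loop: return False on the first violation, carry the assistant flag
def pvBGo : List (List (String × String)) → Bool → Bool
  | [], hasA => hasA
  | message :: rest, hasA =>
    let m := PySem.Dict.ofList message
    if !(m.contains "role") || !(m.contains "content") then false
    else if m.keys.any (fun k => !(k == "role" || k == "content" || k == "name")) then false
    else if !(m.get? "role" == some "system" || m.get? "role" == some "user" || m.get? "role" == some "assistant") then false
    else if m.get? "content" == none || m.get? "content" == some "" then false
    else pvBGo rest (hasA || m.get? "role" == some "assistant")

def check_format_openai_alt (messages_line : List (String × List (List (String × String)))) : Bool :=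
  match (PySem.Dict.ofList messages_line).get? "messages" with
  | none => false   -- Python raises KeyError here; excluded by Pre_
  | some messages => pvBGo messages false

-- ===== PRECONDITION & SPEC =====
-- Pre_ excludes exactly the inputs whose dict lacks the "messages" key: both Pythons raise KeyError there.
def Pre_check_format_openai (messages_line : List (String × List (List (String × String)))) : Prop :=
  (PySem.Dict.ofList messages_line).contains "messages" = true
instance (messages_line : List (String × List (List (String × String)))) : Decidable (Pre_check_format_openai messages_line) := by unfold Pre_check_format_openai; infer_instance

def pvWitness_check_format_openai : (List (String × List (List (String × String)))) :=
  [("messages", [[("role", "assistant"), ("content", "hi")]])]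

def Spec_check_format_openai (messages_line : List (String × List (List (String × String)))) (out : Bool) : Prop := out = check_format_openai_alt messages_line
instance (messages_line : List (String × List (List (String × String)))) (out : Bool) : Decidable (Spec_check_format_openai messages_line out) := by unfold Spec_check_format_openai; infer_instance

-- ===== CLAIM (what is proved, stated in full; the proofs are below) =====
def Claim_equal_check_format_openai : Prop := ∀ (messages_line : List (String × List (List (String × String)))), Dom_check_format_openai messages_line → Pre_check_format_openai messages_line → Spec_check_format_openai messages_line (check_format_openai messages_line)

-- ===== LEMMAS AND PROOFS =====
set_option maxHeartbeats 1000000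

-- message is flagged by (at least one of) A's four per-message checks
def pvBad (message : List (String × String)) : Bool :=
  let m := PySem.Dict.ofList message
  (!(m.contains "role") || !(m.contains "content"))
  || m.keys.any (fun k => !(k == "role" || k == "content" || k == "name"))
  || !(m.get? "role" == some "system" || m.get? "role" == some "user" || m.get? "role" == some "assistant")
  || (m.get? "content" == none || m.get? "content" == some "")

def pvAsst (message : List (String × String)) : Bool :=
  (PySem.Dict.ofList message).get? "role" == some "assistant"

theorem pv_size_ne_zero_of_contains {κ ν : Type} [BEq κ] (d : PySem.Dict κ ν)
    (k : κ) (h : d.contains k = true) : d.size ≠ 0 := by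
  intro hs
  have hitems : d.items = [] := List.length_eq_zero_iff.mp hs
  have hd : d = PySem.Dict.empty := PySem.Dict.ext (by simp [hitems, PySem.Dict.empty])
  rw [hd, PySem.Dict.contains_empty] at h
  exact Bool.false_ne_true h

theorem pv_modify_size_ne_zero {κ ν : Type} [BEq κ] [LawfulBEq κ] (d : PySem.Dict κ ν)
    (k : κ) (d0 : ν) (f : ν → ν) : (d.modify k d0 f).size ≠ 0 :=
  pv_size_ne_zero_of_contains _ k (by simp [PySem.Dict.contains_modify])

theorem pvAStep_size (fe : PySem.Dict String Int) (m : List (String × String)) :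
    ((pvAStep fe m).size = 0) ↔ (fe.size = 0 ∧ pvBad m = false) := by
  by_cases hb : pvBad m = true
  · refine iff_of_false ?_ (by simp [hb])
    simp only [pvBad, Bool.or_eq_true] at hb
    simp only [pvAStep]
    split_ifs <;>
      first
        | exact pv_modify_size_ne_zero _ _ _ _
        | (exfalso; simp only [Bool.or_eq_true] at *; tauto)
  · have hbf : pvBad m = false := Bool.eq_false_iff.mpr hb
    have h := hbf
    simp only [pvBad, Bool.or_eq_false_iff] at h
    simp only [pvAStep, h.1.1.1.1, h.1.1.1.2, h.1.1.2, h.1.2, h.2.1, h.2.2,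
      Bool.or_self, Bool.false_eq_true, if_false]
    simp [hbf]

theorem pv_foldl_size (msgs : List (List (String × String))) :
    ∀ fe : PySem.Dict String Int,
      ((msgs.foldl pvAStep fe).size = 0) ↔ (fe.size = 0 ∧ msgs.all (fun m => !pvBad m) = true) := by
  induction msgs with
  | nil => intro fe; simp
  | cons m rest ih =>
    intro fe
    simp only [List.foldl_cons, ih, pvAStep_size, List.all_cons]
    constructor
    · rintro ⟨⟨h1, h2⟩, h3⟩; exact ⟨h1, by simp [h2, h3]⟩
    · rintro ⟨h1, h2⟩
      simp only [Bool.and_eq_true, Bool.not_eq_true'] at h2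
      exact ⟨⟨h1, h2.1⟩, h2.2⟩

theorem pvBGo_eq (msgs : List (List (String × String))) :
    ∀ hasA : Bool,
      pvBGo msgs hasA = if msgs.all (fun m => !pvBad m) then (hasA || msgs.any pvAsst) else false := by
  induction msgs with
  | nil => intro hasA; simp [pvBGo]
  | cons m rest ih =>
    intro hasA
    simp only [List.all_cons, List.any_cons]
    by_cases hbp : pvBad m = true
    · have hb0 := hbp
      simp only [pvBad, Bool.or_eq_true] at hbp
      simp only [pvBGo, hb0, Bool.not_true, Bool.false_and, Bool.false_eq_true, if_false]
      split_ifs <;>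
        first
          | rfl
          | (exfalso; simp only [Bool.or_eq_true] at *; tauto)
    · have hbf : pvBad m = false := Bool.eq_false_iff.mpr hbp
      have h := hbf
      simp only [pvBad, Bool.or_eq_false_iff] at h
      simp only [pvBGo, h.1.1.1.1, h.1.1.1.2, h.1.1.2, h.1.2, h.2.1, h.2.2,
        Bool.or_self, Bool.false_eq_true, if_false,
        ih, hbf, Bool.not_false, Bool.true_and]
      by_cases hr : (rest.all fun m => !pvBad m) = true <;> simp [hr, pvAsst, Bool.or_assoc]

-- ===== VERDICT (by name: the statement is the Claim_ definition above) =====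
theorem check_format_openai_spec : Claim_equal_check_format_openai := by
  intro ml _hdom hpre
  unfold Pre_check_format_openai at hpre
  unfold Spec_check_format_openai check_format_openai check_format_openai_alt
  have hsome : ((PySem.Dict.ofList ml).get? "messages").isSome := by
    rw [← PySem.Dict.contains_eq_isSome_get?, hpre]
  cases hget : (PySem.Dict.ofList ml).get? "messages" with
  | none => rw [hget] at hsome; simp at hsome
  | some messages =>
    simp only [hget, hpre, Bool.not_true]
    rw [pvBGo_eq]
    have hanyeq : messages.any pvAsst
        = messages.any (fun message => (PySem.Dict.ofList message).get? "role" == some "assistant") := rfl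
    by_cases hall : messages.all (fun m => !pvBad m) = true
    · by_cases hany : messages.any (fun message => (PySem.Dict.ofList message).get? "role" == some "assistant") = true
      · have h0 : (messages.foldl pvAStep PySem.Dict.empty).size = 0 :=
          (pv_foldl_size messages PySem.Dict.empty).mpr ⟨PySem.Dict.size_empty, hall⟩
        simp [hall, hanyeq, hany, h0]
      · simp [hall, hanyeq, hany, pv_modify_size_ne_zero]
    · by_cases hany : messages.any (fun message => (PySem.Dict.ofList message).get? "role" == some "assistant") = true
      · have hnz : (messages.foldl pvAStep PySem.Dict.empty).size ≠ 0 := by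
          intro h0
          exact hall ((pv_foldl_size messages PySem.Dict.empty).mp h0).2
        simp [hall, hany, hnz]
      · simp [hall, hany, pv_modify_size_ne_zero]
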